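-- pv_equiv track=rewrite | github.com/Crystal-wzy/pto-isa | docs/mkdocs/migrate_isa_visual_callouts.py | convert_target_h3_to_tabs
-- ===== SOURCE A (Python) =====
-- def strip_blank_edges(lines: list[str]) -> list[str]:
--     start = 0
--     end = len(lines)
--     while start < end and not lines[start].strip():
--         start += 1
--     while end > start and not lines[end - 1].strip():
--         end -= 1
--     return lines[start:end]
--
-- def indent_for_admonition(lines: list[str]) -> list[str]:
--     return [f"    {line}" if line else "" for line in lines]
--
-- def canonical_target_label(heading: str) -> str | None:
--     normalized = heading.lower().replace("-", "").replace("_", "").replace("/", "").replace(" ", "")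
--     if normalized.startswith("cpusim"):
--         return "CPU_SIM"
--     if normalized.startswith("a2a3") or normalized.startswith("a2/a3"):
--         return "A2/A3"
--     if normalized.startswith("a5"):
--         return "A5"
--     return None
--
-- def convert_target_h3_to_tabs(body: list[str]) -> tuple[list[str], bool]:
--     h3_indices = [index for index, line in enumerate(body) if line.startswith("### ")]
--     if len(h3_indices) < 2:
--         return body, False
--
--     labels = [canonical_target_label(body[index][4:].strip()) for index in h3_indices]
--     if any(label is None for label in labels) or len(set(labels)) != len(labels):
--         return body, False
--
--     output = body[: h3_indices[0]]
--     for pos, start in enumerate(h3_indices):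
--         end = h3_indices[pos + 1] if pos + 1 < len(h3_indices) else len(body)
--         content = strip_blank_edges(body[start + 1 : end])
--         output.append(f'=== "{labels[pos]}"')
--         output.extend(indent_for_admonition(content or ["No additional restriction is documented for this target."]))
--         output.append("")
--     return strip_blank_edges(output), True
-- ===== SOURCE B (Python) =====
-- DEFAULT_MESSAGE = "No additional restriction is documented for this target."
--
--
-- def _drop_blank_prefix(lines: list[str]) -> list[str]:
--     out = list(lines)
--     while out and not out[0].strip():
--         out.pop(0)
--     return out
--
--
-- def strip_blank_edges(lines: list[str]) -> list[str]:
--     # drop leading blanks, then (via reversal) trailing blanks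
--     return _drop_blank_prefix(_drop_blank_prefix(lines)[::-1])[::-1]
--
--
-- def indent_for_admonition(lines: list[str]) -> list[str]:
--     return [f"    {line}" if line else "" for line in lines]
--
--
-- def canonical_target_label(heading: str) -> str | None:
--     normalized = heading.lower().replace("-", "").replace("_", "").replace("/", "").replace(" ", "")
--     if normalized.startswith("cpusim"):
--         return "CPU_SIM"
--     if normalized.startswith("a2a3") or normalized.startswith("a2/a3"):
--         return "A2/A3"
--     if normalized.startswith("a5"):
--         return "A5"
--     return None
--
--
-- def convert_target_h3_to_tabs(body: list[str]) -> tuple[list[str], bool]: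
--     # One backward pass splits body into (preamble, sections) without index slicing.
--     sections: list[tuple[str, list[str]]] = []  # (heading, content lines)
--     tail: list[str] = []
--     for line in reversed(body):
--         if line.startswith("### "):
--             sections.insert(0, (line[4:].strip(), tail))
--             tail = []
--         else:
--             tail.insert(0, line)
--     preamble = tail
--
--     if len(sections) < 2:
--         return body, False
--
--     labels = [canonical_target_label(heading) for heading, _content in sections]
--     if None in labels or len(set(labels)) != len(labels):
--         return body, False
--
--     output = list(preamble)
--     for label, (_heading, content) in zip(labels, sections):
--         content = strip_blank_edges(content)
--         output.append(f'=== "{label}"')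
--         output.extend(indent_for_admonition(content or [DEFAULT_MESSAGE]))
--         output.append("")
--     return strip_blank_edges(output), True
-- ===== Notes on version B (the rewrite author's own statement) =====
-- stated objective: alternative
-- what changed: Replaces the h3-index comprehension plus between-consecutive-indices slicing with a single backward pass that splits body into a preamble and (heading, content) sections directly, and replaces the two index-based while loops of strip_blank_edges with a drop-leading-blanks pass applied twice via reversal.
import Mathlib
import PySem

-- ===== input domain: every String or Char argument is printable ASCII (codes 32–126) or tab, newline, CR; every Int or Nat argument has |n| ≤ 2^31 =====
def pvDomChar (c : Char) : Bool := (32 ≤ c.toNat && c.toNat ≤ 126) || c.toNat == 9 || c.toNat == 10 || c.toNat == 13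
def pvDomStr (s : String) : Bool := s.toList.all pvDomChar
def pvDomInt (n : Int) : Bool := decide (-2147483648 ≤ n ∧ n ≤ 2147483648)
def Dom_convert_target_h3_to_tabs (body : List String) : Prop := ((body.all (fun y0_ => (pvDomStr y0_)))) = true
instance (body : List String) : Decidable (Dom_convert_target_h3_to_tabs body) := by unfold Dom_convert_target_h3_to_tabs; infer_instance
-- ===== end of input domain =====

-- B re-implements A with one backward pass that splits the body into preamble and
-- (heading, content) sections instead of h3-index slicing, and a drop-leading-blanks
-- pass applied twice via reversal instead of two index while-loops (objective: alternative).

-- ===== PORT A =====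

-- helper code shared verbatim by Source A and Source B
def pvBlank (l : String) : Bool := PySem.Str.strip l == ""

def DEFAULT_MESSAGE : String := "No additional restriction is documented for this target."

-- f"    {line}" if line else ""
def indent_for_admonition (lines : List String) : List String :=
  lines.map (fun line => if line ≠ "" then "    " ++ line else "")

def canonical_target_label (heading : String) : Option String :=
  let normalized :=
    PySem.Str.replace (PySem.Str.replace (PySem.Str.replace (PySem.Str.replace
      (PySem.Str.lower heading) "-" "") "_" "") "/" "") " " ""
  if PySem.Str.startswith normalized "cpusim" then some "CPU_SIM"
  else if PySem.Str.startswith normalized "a2a3" || PySem.Str.startswith normalized "a2/a3" then some "A2/A3"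
  else if PySem.Str.startswith normalized "a5" then some "A5"
  else none

-- Python str() of the optional label as produced by the f-string (only `some` is reachable
-- in the branch that uses it; `none` would print as "None")
def pyStrOptLabel : Option String → String
  | some s => s
  | none => "None"

-- while start < end and not lines[start].strip(): start += 1   (index in range by the guard)
def aStripStart (lines : List String) (endIdx : Nat) (start : Nat) : Nat :=
  if start < endIdx && pvBlank (lines.getD start "") then aStripStart lines endIdx (start + 1)
  else start
termination_by endIdx - start
decreasing_by simp_all; omega

-- while end > start and not lines[end - 1].strip(): end -= 1   (index in range by the guard)
def aStripEnd (lines : List String) (startIdx : Nat) (e : Nat) : Nat :=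
  if startIdx < e && pvBlank (lines.getD (e - 1) "") then aStripEnd lines startIdx (e - 1)
  else e
termination_by e
decreasing_by simp_all; omega

def strip_blank_edges (lines : List String) : List String :=
  let s := aStripStart lines lines.length 0
  let e := aStripEnd lines s lines.length
  PySem.List.slice lines (some (s : Int)) (some (e : Int))

def convert_target_h3_to_tabs (body : List String) : List String × Bool :=
  let h3_indices := ((PySem.List.enumerate body).filter (fun p => PySem.Str.startswith p.2 "### ")).map (fun p => p.1)
  if h3_indices.length < 2 then (body, false)
  else
    let labels := h3_indices.map (fun index =>
      canonical_target_label (PySem.Str.strip (PySem.Str.slice (PySem.List.pyGetD body index "") (some 4) none)))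
    if labels.any (fun label => label == none) || ((PySem.Set.ofList labels).length != labels.length) then
      (body, false)
    else
      let output := PySem.List.slice body none (some (h3_indices.getD 0 0))
      let output := (PySem.List.enumerate h3_indices).foldl (fun out pi =>
        let pos := pi.1
        let start := pi.2
        let e : Int := if pos + 1 < (h3_indices.length : Int) then PySem.List.pyGetD h3_indices (pos + 1) 0
                       else (body.length : Int)
        let content := strip_blank_edges (PySem.List.slice body (some (start + 1)) (some e))
        let out := out ++ ["=== \"" ++ pyStrOptLabel (PySem.List.pyGetD labels pos none) ++ "\""]
        let out := out ++ indent_for_admonition (if content.isEmpty then [DEFAULT_MESSAGE] else content)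
        out ++ [""]) output
      (strip_blank_edges output, true)

-- ===== PORT B =====

-- while out and not out[0].strip(): out.pop(0)
def dropBlankPrefix : List String → List String
  | [] => []
  | l :: rest => if pvBlank l then dropBlankPrefix rest else l :: rest

def strip_blank_edges_alt (lines : List String) : List String :=
  (dropBlankPrefix (dropBlankPrefix lines).reverse).reverse

-- the backward pass of Source B: for line in reversed(body): … (prepends = foldr)
def split_sections (body : List String) : List (String × List String) × List String :=
  body.foldr (fun line st =>
    if PySem.Str.startswith line "### " then
      ((PySem.Str.strip (PySem.Str.slice line (some 4) none), st.2) :: st.1, ([] : List String))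
    else (st.1, line :: st.2)) ([], [])

def convert_target_h3_to_tabs_alt (body : List String) : List String × Bool :=
  let st := split_sections body
  let sections := st.1
  let preamble := st.2
  if sections.length < 2 then (body, false)
  else
    let labels := sections.map (fun s => canonical_target_label s.1)
    if labels.contains none || ((PySem.Set.ofList labels).length != labels.length) then
      (body, false)
    else
      let output := (labels.zip sections).foldl (fun out ls =>
        let content := strip_blank_edges_alt ls.2.2
        ((out ++ ["=== \"" ++ pyStrOptLabel ls.1 ++ "\""]) ++
          indent_for_admonition (if content.isEmpty then [DEFAULT_MESSAGE] else content)) ++ [""]) preamble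
      (strip_blank_edges_alt output, true)

-- ===== PRECONDITION & SPEC =====
def Spec_convert_target_h3_to_tabs (body : List String) (out : List String × Bool) : Prop := out = convert_target_h3_to_tabs_alt body
instance (body : List String) (out : List String × Bool) : Decidable (Spec_convert_target_h3_to_tabs body out) := by unfold Spec_convert_target_h3_to_tabs; infer_instance

-- ===== CLAIM (what is proved, stated in full; the proofs are below) =====
def Claim_equal_convert_target_h3_to_tabs : Prop := ∀ (body : List String), Dom_convert_target_h3_to_tabs body → Spec_convert_target_h3_to_tabs body (convert_target_h3_to_tabs body)

-- ===== LEMMAS AND PROOFS =====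

theorem aStart_spec (lines : List String) (k : Nat) (hk : k ≤ lines.length) :
    k ≤ aStripStart lines lines.length k ∧ aStripStart lines lines.length k ≤ lines.length ∧
      lines.drop (aStripStart lines lines.length k) = dropBlankPrefix (lines.drop k) := by
  fun_induction aStripStart lines lines.length k with
  | case1 start h ih =>
    simp only [Bool.and_eq_true, decide_eq_true_eq] at h
    obtain ⟨h1, h2⟩ := h
    obtain ⟨ih1, ih2, ih3⟩ := ih (by omega)
    refine ⟨by omega, ih2, ?_⟩
    rw [ih3, List.drop_eq_getElem_cons h1, dropBlankPrefix]
    rw [List.getD_eq_getElem _ _ h1] at h2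
    simp [h2]
  | case2 start h =>
    refine ⟨le_refl _, hk, ?_⟩
    simp only [Bool.and_eq_true, decide_eq_true_eq, not_and] at h
    by_cases hlt : start < lines.length
    · rw [List.drop_eq_getElem_cons hlt, dropBlankPrefix]
      have := h hlt
      rw [List.getD_eq_getElem _ _ hlt] at this
      simp [this]
    · have hd : List.drop start lines = [] := List.drop_eq_nil_iff.mpr (by omega)
      rw [hd]; rfl
theorem aEnd_spec (lines : List String) (s : Nat) (e : Nat) (hse : s ≤ e) (he : e ≤ lines.length) :
    s ≤ aStripEnd lines s e ∧ aStripEnd lines s e ≤ e ∧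
      (lines.drop s).take (aStripEnd lines s e - s)
        = (dropBlankPrefix ((lines.drop s).take (e - s)).reverse).reverse := by
  fun_induction aStripEnd lines s e with
  | case1 e h ih =>
    simp only [Bool.and_eq_true, decide_eq_true_eq] at h
    obtain ⟨h1, h2⟩ := h
    obtain ⟨ih1, ih2, ih3⟩ := ih (by omega) (by omega)
    refine ⟨ih1, by omega, ?_⟩
    have hseg : (lines.drop s).take (e - s) = (lines.drop s).take (e - 1 - s) ++ [lines[e-1]'(by omega)] := by
      have h1' : e - s = (e - 1 - s) + 1 := by omega
      rw [h1', List.take_succ]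
      congr 1
      rw [List.getElem?_drop]
      have : s + (e - 1 - s) = e - 1 := by omega
      rw [this, List.getElem?_eq_getElem (by omega)]
      rfl
    rw [hseg, List.reverse_append]
    rw [List.getD_eq_getElem _ _ (by omega : e - 1 < lines.length)] at h2
    simp only [List.reverse_cons, List.reverse_nil, List.nil_append, List.singleton_append]
    rw [ih3]
    congr 1
    rw [dropBlankPrefix]
    simp [h2]
  | case2 e h =>
    refine ⟨hse, le_refl _, ?_⟩
    simp only [Bool.and_eq_true, decide_eq_true_eq, not_and] at h
    by_cases hes : s = e
    · subst hes
      simp [dropBlankPrefix]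
    · have h1 : s < e := by omega
      have h2 := h h1
      rw [List.getD_eq_getElem _ _ (by omega : e - 1 < lines.length)] at h2
      have hseg : (lines.drop s).take (e - s) = (lines.drop s).take (e - 1 - s) ++ [lines[e-1]'(by omega)] := by
        have h1' : e - s = (e - 1 - s) + 1 := by omega
        rw [h1', List.take_succ]
        congr 1
        rw [List.getElem?_drop]
        have : s + (e - 1 - s) = e - 1 := by omega
        rw [this, List.getElem?_eq_getElem (by omega)]
        rfl
      conv_rhs => rw [hseg, List.reverse_append]
      simp only [List.reverse_cons, List.reverse_nil, List.nil_append, List.singleton_append]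
      rw [dropBlankPrefix]
      simp only [h2, Bool.false_eq_true, if_neg, ite_false]
      rw [List.reverse_cons, List.reverse_reverse, ← hseg]

theorem strip_eq_strip_alt (lines : List String) :
    strip_blank_edges lines = strip_blank_edges_alt lines := by
  unfold strip_blank_edges strip_blank_edges_alt
  obtain ⟨hs1, hs2, hs3⟩ := aStart_spec lines 0 (by omega)
  obtain ⟨he1, he2, he3⟩ := aEnd_spec lines (aStripStart lines lines.length 0) lines.length hs2 (le_refl _)
  rw [PySem.List.slice_natCast]
  rw [he3]
  congr 2
  rw [List.take_of_length_le (by simp)]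
  rw [hs3]
  simp
def pvH3 (l : String) : Bool := PySem.Str.startswith l "### "
def headOf (l : String) : String := PySem.Str.strip (PySem.Str.slice l (some 4) none)

def aSecs : List String → List (String × List String)
  | [] => []
  | l :: rest => if pvH3 l then (headOf l, rest.takeWhile (fun x => !pvH3 x)) :: aSecs rest
                 else aSecs rest

def natIdxs : List String → List Nat
  | [] => []
  | l :: rest => if pvH3 l then 0 :: (natIdxs rest).map (· + 1) else (natIdxs rest).map (· + 1)

theorem split_sections_eq (body : List String) :
    split_sections body = (aSecs body, body.takeWhile (fun x => !pvH3 x)) := by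
  unfold split_sections
  induction body with
  | nil => simp [aSecs]
  | cons l rest ih =>
    simp only [List.foldr_cons, ih, List.takeWhile_cons]
    by_cases h : PySem.Chars.startswith l.toList ['#', '#', '#', ' ']
    · simp [aSecs, pvH3, headOf, h]
    · simp [aSecs, pvH3, headOf, h]

theorem idxs_eq (body : List String) (s : Int) :
    ((PySem.List.enumerate body s).filter (fun p => PySem.Str.startswith p.2 "### ")).map (fun p => p.1)
      = List.map (fun (n : Nat) => s + (n : Int)) (natIdxs body) := by
  induction body generalizing s with
  | nil => simp [PySem.List.enumerate_nil, natIdxs]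
  | cons l rest ih =>
    rw [PySem.List.enumerate_cons, natIdxs]
    by_cases h : PySem.Str.startswith l "### " = true
    · rw [List.filter_cons_of_pos (by simpa using h), List.map_cons, ih (s + 1),
        if_pos (show pvH3 l = true from h)]
      rw [List.map_cons, List.map_map]
      congr 1
      · simp
      · apply List.map_congr_left
        intro n _
        simp only [Function.comp_apply]
        push_cast
        ring
    · rw [List.filter_cons_of_neg (by simpa using h), ih (s + 1),
        if_neg (show ¬ pvH3 l = true from h), List.map_map]
      apply List.map_congr_left
      intro n _
      simp only [Function.comp_apply]
      push_cast
      ring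

theorem natIdxs_length (body : List String) : (natIdxs body).length = (aSecs body).length := by
  induction body with
  | nil => rfl
  | cons l rest ih =>
    by_cases h : pvH3 l <;> simp [natIdxs, aSecs, h, ih]

theorem take_head_natIdxs (body : List String) :
    body.take ((natIdxs body).headD body.length) = body.takeWhile (fun x => !pvH3 x) := by
  induction body with
  | nil => rfl
  | cons l rest ih =>
    by_cases h : pvH3 l
    · simp [natIdxs, h, List.takeWhile_cons]
    · rw [natIdxs, if_neg (by simp [h]), List.takeWhile_cons]
      simp only [h, Bool.not_false, ite_true]
      cases hn : natIdxs rest with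
      | nil =>
        simp only [hn, List.map_nil, List.headD_nil, List.length_cons, List.take_succ_cons]
        rw [← ih, hn, List.headD_nil]
      | cons a t =>
        simp only [hn, List.map_cons, List.headD_cons, List.take_succ_cons]
        rw [← ih, hn, List.headD_cons]

theorem heads_eq (body : List String) :
    (natIdxs body).map (fun i => headOf (body.getD i "")) = (aSecs body).map (fun s => s.1) := by
  induction body with
  | nil => rfl
  | cons l rest ih =>
    by_cases h : pvH3 l
    · simp only [natIdxs, aSecs, h, ite_true, List.map_cons, List.map_map]
      refine congrArg₂ List.cons rfl ?_
      rw [← ih]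
      apply List.map_congr_left
      intro n _
      rfl
    · simp only [natIdxs, aSecs, h, Bool.false_eq_true, ite_false, List.map_map]
      rw [← ih]
      apply List.map_congr_left
      intro n _
      rfl

theorem slice_cons_succ (x : String) (xs : List String) (m k : Nat) :
    PySem.List.slice (x :: xs) (some (((m + 1 : Nat)) : Int)) (some (((k + 1 : Nat)) : Int))
      = PySem.List.slice xs (some ((m : Nat) : Int)) (some ((k : Nat) : Int)) := by
  rw [PySem.List.slice_natCast, PySem.List.slice_natCast, List.drop_succ_cons]
  congr 1
  omega

theorem zip_shift (N : List Nat) (r : Nat) :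
    (List.map (· + 1) N).zip ((List.map (· + 1) N).tail ++ [r + 1])
      = (N.zip (N.tail ++ [r])).map (Prod.map (· + 1) (· + 1)) := by
  rw [← List.map_tail,
    show List.map (· + 1) N.tail ++ [r + 1] = List.map (· + 1) (N.tail ++ [r]) by simp,
    List.zip_map]

theorem map_slice_shift (l : String) (rest : List String) (P : List (Nat × Nat)) :
    (P.map (Prod.map (· + 1) (· + 1))).map
        (fun p => PySem.List.slice (l :: rest) (some ((p.1 + 1 : Nat) : Int)) (some ((p.2 : Nat) : Int)))
      = P.map (fun p => PySem.List.slice rest (some ((p.1 + 1 : Nat) : Int)) (some ((p.2 : Nat) : Int))) := by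
  rw [List.map_map]
  apply List.map_congr_left
  intro p _
  simp only [Function.comp_apply, Prod.map_apply]
  exact slice_cons_succ l rest (p.1 + 1) p.2

theorem contents_eq (body : List String) :
    ((natIdxs body).zip ((natIdxs body).tail ++ [body.length])).map
        (fun p => PySem.List.slice body (some ((p.1 + 1 : Nat) : Int)) (some ((p.2 : Nat) : Int)))
      = (aSecs body).map (fun s => s.2) := by
  induction body with
  | nil => rfl
  | cons l rest ih =>
    by_cases h : pvH3 l
    · rw [natIdxs, if_pos h, aSecs, if_pos h, List.length_cons, List.tail_cons]
      cases hn : natIdxs rest with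
      | nil =>
        have ha : aSecs rest = [] := List.length_eq_zero_iff.mp (by rw [← natIdxs_length, hn]; rfl)
        have htk := take_head_natIdxs rest
        rw [hn, List.headD_nil] at htk
        simp only [List.map_nil, List.nil_append, List.zip_cons_cons, List.zip_nil_left,
          List.map_cons, List.map_nil, ha]
        rw [show ((0 : Nat) + 1 : Nat) = ((0 : Nat) + 1 : Nat) from rfl,
          slice_cons_succ l rest 0 rest.length, PySem.List.slice_natCast]
        simp only [List.drop_zero, Nat.sub_zero]
        rw [htk]
      | cons a t =>
        have htk := take_head_natIdxs rest
        rw [hn, List.headD_cons] at htk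
        rw [hn] at ih
        rw [List.tail_cons] at ih
        simp only [List.map_cons, List.cons_append, List.zip_cons_cons, List.map_cons]
        have hz := zip_shift (a :: t) rest.length
        simp only [List.map_cons, List.tail_cons] at hz
        rw [hz, map_slice_shift, ih]
        congr 1
        rw [slice_cons_succ l rest 0 a, PySem.List.slice_natCast]
        simp only [List.drop_zero, Nat.sub_zero]
        rw [htk]
    · rw [natIdxs, if_neg h, aSecs, if_neg h, List.length_cons, zip_shift,
        map_slice_shift, ih]

theorem contains_none_eq_any (L : List (Option String)) :
    L.contains none = L.any (fun l => l == none) := by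
  induction L with
  | nil => rfl
  | cons a t ih =>
    rw [List.contains_cons, List.any_cons, ih]
    cases a <;> rfl

theorem labels_eq (body : List String) :
    List.map (fun index => canonical_target_label (PySem.Str.strip (PySem.Str.slice (PySem.List.pyGetD body index "") (some 4) none)))
        (List.map (fun (n : Nat) => ((n : Nat) : Int)) (natIdxs body))
      = (aSecs body).map (fun s => canonical_target_label s.1) := by
  have h := congrArg (List.map canonical_target_label) (heads_eq body)
  simp only [List.map_map, Function.comp_def] at h
  rw [List.map_map, ← h]
  apply List.map_congr_left
  intro n hn
  simp only [Function.comp_apply]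
  rw [PySem.List.pyGetD_natCast]
  rfl

theorem preamble_eq (body : List String) (h2 : 2 ≤ (natIdxs body).length) :
    PySem.List.slice body none (some ((List.map (fun (n : Nat) => ((n : Nat) : Int)) (natIdxs body)).getD 0 0))
      = body.takeWhile (fun x => !pvH3 x) := by
  cases hn : natIdxs body with
  | nil => rw [hn] at h2; simp at h2
  | cons a t =>
    rw [List.map_cons, List.getD_cons_zero, PySem.List.slice_to_natCast]
    have htk := take_head_natIdxs body
    rw [hn, List.headD_cons] at htk
    exact htk

theorem foldl_block_eq {β : Type} (L : List β) (x : β → String) (y : β → List String) (init : List String) :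
    L.foldl (fun out pi => (out ++ [x pi] ++ y pi) ++ [""]) init
      = init ++ L.flatMap (fun pi => x pi :: (y pi ++ [""])) := by
  rw [PySem.List.foldl_congr_mem _ _ (fun out pi => out ++ (x pi :: (y pi ++ [""]))) _
    (by intro acc pi _; simp)]
  exact PySem.List.foldl_append_eq_flatMap _ L init

theorem main_eq (body : List String) :
    convert_target_h3_to_tabs body = convert_target_h3_to_tabs_alt body := by
  have hidx : ((PySem.List.enumerate body).filter (fun p => PySem.Str.startswith p.2 "### ")).map (fun p => p.1)
      = List.map (fun (n : Nat) => ((n : Nat) : Int)) (natIdxs body) := by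
    simpa using idxs_eq body 0
  simp only [convert_target_h3_to_tabs, convert_target_h3_to_tabs_alt, split_sections_eq, hidx,
    List.length_map]
  rw [← natIdxs_length]
  by_cases hsmall : (natIdxs body).length < 2
  · simp only [if_pos hsmall]
  · simp only [if_neg hsmall]
    rw [labels_eq, contains_none_eq_any]
    by_cases hlab : (((aSecs body).map (fun s => canonical_target_label s.1)).any (fun label => label == none)
        || ((PySem.Set.ofList ((aSecs body).map (fun s => canonical_target_label s.1))).length != (natIdxs body).length)) = true
    · rw [if_pos hlab, if_pos hlab]
    · rw [if_neg hlab, if_neg hlab, preamble_eq body (by omega)]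
      simp only [strip_eq_strip_alt]
      rw [foldl_block_eq, foldl_block_eq]
      congr 1
      rw [List.flatMap_def, List.flatMap_def]
      congr 3
      apply List.ext_getElem
      · simp [PySem.List.length_enumerate, natIdxs_length]
      · intro p h1 h2
        simp only [List.getElem_map, PySem.List.getElem_enumerate, List.getElem_zip, zero_add]
        have hp : p < (natIdxs body).length := by
          simpa [PySem.List.length_enumerate] using h1
        have hS : p < (aSecs body).length := by rw [← natIdxs_length]; exact hp
        have hlabels : p < (List.map (fun s => canonical_target_label s.1) (aSecs body)).length := by
          simpa using hS
        have hys : p < ((natIdxs body).tail ++ [body.length]).length := by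
          simp only [List.length_append, List.length_tail, List.length_singleton]
          omega
        have hpair : p < ((natIdxs body).zip ((natIdxs body).tail ++ [body.length])).length := by
          rw [List.length_zip]
          simp only [List.length_append, List.length_tail, List.length_singleton]
          omega
        have hc := congrArg (fun l => l[p]?) (contents_eq body)
        simp only [List.getElem?_map] at hc
        rw [List.getElem?_eq_getElem hpair, List.getElem?_eq_getElem hS] at hc
        simp only [List.getElem_zip, Option.map_some] at hc
        rw [Option.some_inj] at hc
        push_cast at hc
        rw [PySem.List.pyGetD_natCast (List.map (fun s => canonical_target_label s.1) (aSecs body)) p none,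
          List.getD_eq_getElem _ _ hlabels]
        by_cases hcond : p + 1 < (natIdxs body).length
        · rw [if_pos (show (↑p + 1 : Int) < ((natIdxs body).length : Int) by exact_mod_cast hcond)]
          rw [show ((p : Int) + 1) = ((p + 1 : Nat) : Int) by push_cast; ring]
          rw [PySem.List.pyGetD_natCast (List.map (fun (n : Nat) => ((n : Nat) : Int)) (natIdxs body)) (p + 1) 0,
            List.getD_eq_getElem _ _ (show p + 1 < (List.map (fun (n : Nat) => ((n : Nat) : Int)) (natIdxs body)).length by simpa using hcond),
            List.getElem_map]
          rw [List.getElem_append_left ((by simp only [List.length_tail]; omega) : p < (natIdxs body).tail.length),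
            List.getElem_tail] at hc
          simp only [List.getElem_map]
          rw [hc]
        · rw [if_neg (show ¬ ((↑p + 1 : Int) < ((natIdxs body).length : Int)) by exact_mod_cast hcond)]
          rw [List.getElem_append_right ((by simp only [List.length_tail]; omega) : (natIdxs body).tail.length ≤ p)] at hc
          simp only [List.getElem_singleton] at hc
          simp only [List.getElem_map]
          rw [hc]

-- ===== VERDICT (by name: the statement is the Claim_ definition above) =====
theorem convert_target_h3_to_tabs_spec : Claim_equal_convert_target_h3_to_tabs := by
  intro body _
  exact main_eq body
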